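-- pv_equiv track=rewrite | github.com/ContextLab/pbs-social-committee | compile_schedule.py | remove_last_lines
-- ===== SOURCE A (Python) =====
-- def remove_last_lines(lines, n):
--     count = 0
--     for i in range(len(lines) - 1, -1, -1):
--         if lines[i].strip() != '':
--             count += 1
--             if count == n:
--                 return lines[:i]
--     return lines
-- ===== SOURCE B (Python) =====
-- def remove_last_lines(lines, n):
--     idx = [i for i, l in enumerate(lines) if l.strip() != '']
--     if n >= 1 and len(idx) >= n:
--         return lines[:idx[-n]]
--     return lines
-- ===== Notes on version B (the rewrite author's own statement) =====
-- stated objective: alternative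
-- what changed: Replaces the backward early-exit counting scan with a forward index table of non-empty lines plus one negative-index lookup.
import Mathlib
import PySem

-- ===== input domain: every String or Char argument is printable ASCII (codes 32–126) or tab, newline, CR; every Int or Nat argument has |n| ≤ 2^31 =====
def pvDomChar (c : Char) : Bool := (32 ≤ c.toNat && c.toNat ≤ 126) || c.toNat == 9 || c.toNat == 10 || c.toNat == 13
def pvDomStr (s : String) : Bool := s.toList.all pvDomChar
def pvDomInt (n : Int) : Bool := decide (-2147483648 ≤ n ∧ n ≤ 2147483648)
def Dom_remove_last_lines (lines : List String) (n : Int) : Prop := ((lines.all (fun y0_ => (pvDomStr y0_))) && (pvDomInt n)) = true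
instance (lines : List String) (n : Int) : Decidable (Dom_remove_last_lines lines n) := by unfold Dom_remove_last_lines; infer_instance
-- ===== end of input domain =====

-- B replaces A's backward early-exit counting scan by a forward index table of the
-- non-empty lines plus a single negative-index lookup; equal cost, different shape.

-- ===== PORT A =====
-- the for-loop over range(len(lines)-1, -1, -1) with early return, state = count
def removeLastLinesLoopA (lines : List String) (n : Int) :
    List Int → Int → Option (List String)
  | [], _ => none
  | i :: rest, count =>
    if PySem.Str.strip (PySem.List.pyGetD lines i "") ≠ "" then
      if count + 1 = n then some (PySem.List.slice lines none (some i))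
      else removeLastLinesLoopA lines n rest (count + 1)
    else removeLastLinesLoopA lines n rest count

def remove_last_lines (lines : List String) (n : Int) : List String :=
  (removeLastLinesLoopA lines n
      (PySem.List.pyRange ((lines.length : Int) - 1) (-1) (-1)) 0).getD lines

-- ===== PORT B =====
def remove_last_lines_alt (lines : List String) (n : Int) : List String :=
  let idx : List Int :=
    ((PySem.List.enumerate lines 0).filter
        (fun p => PySem.Str.strip p.2 ≠ "")).map (·.1)
  if n ≥ 1 ∧ (idx.length : Int) ≥ n then
    PySem.List.slice lines none (some (PySem.List.pyGetD idx (-n) 0))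
  else lines

-- ===== PRECONDITION & SPEC =====
def Spec_remove_last_lines (lines : List String) (n : Int) (out : List String) : Prop := out = remove_last_lines_alt lines n
instance (lines : List String) (n : Int) (out : List String) : Decidable (Spec_remove_last_lines lines n out) := by unfold Spec_remove_last_lines; infer_instance

-- ===== CLAIM (what is proved, stated in full; the proofs are below) =====
def Claim_equal_remove_last_lines : Prop := ∀ (lines : List String) (n : Int), Dom_remove_last_lines lines n → Spec_remove_last_lines lines n (remove_last_lines lines n)

-- ===== LEMMAS AND PROOFS =====

-- A's loop over any descending index list ds, in closed form: the (n-count)-th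
-- kept index of ds, sliced, if it exists.
theorem loopA_closed (lines : List String) (n : Int) (ds : List Int) (count : Int) :
    removeLastLinesLoopA lines n ds count =
      if n ≤ count then none
      else ((ds.filter (fun i => PySem.Str.strip (PySem.List.pyGetD lines i "") ≠ ""))[(n - count - 1).toNat]?).map
        (fun i => PySem.List.slice lines none (some i)) := by
  induction ds generalizing count with
  | nil => simp [removeLastLinesLoopA]
  | cons i rest ih =>
    by_cases hP : PySem.Str.strip (PySem.List.pyGetD lines i "") ≠ ""
    · by_cases hc : count + 1 = n
      · have h1 : ¬ n ≤ count := by omega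
        have h2 : (n - count - 1).toNat = 0 := by omega
        simp [removeLastLinesLoopA, hP, hc, h1, h2]
      · rw [show removeLastLinesLoopA lines n (i :: rest) count
              = removeLastLinesLoopA lines n rest (count + 1) by
            simp [removeLastLinesLoopA, hP, hc]]
        rw [ih]
        by_cases h3 : n ≤ count
        · have h4 : n ≤ count + 1 := by omega
          simp [h3, h4]
        · have h4 : ¬ n ≤ count + 1 := by omega
          have h5 : (n - count - 1).toNat = (n - (count + 1) - 1).toNat + 1 := by omega
          simp [h3, h4, hP, h5]
    · rw [show removeLastLinesLoopA lines n (i :: rest) count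
            = removeLastLinesLoopA lines n rest count by
          simp [removeLastLinesLoopA, hP]]
      rw [ih]
      simp [hP]

theorem remove_last_lines_spec : Claim_equal_remove_last_lines := by
  intro lines n _
  show remove_last_lines lines n = remove_last_lines_alt lines n
  unfold remove_last_lines remove_last_lines_alt
  rw [loopA_closed]
  have hrange : PySem.List.pyRange ((lines.length : Int) - 1) (-1) (-1)
      = (PySem.List.pyRange 0 (lines.length : Int) 1).reverse := by
    rw [PySem.List.pyRange_neg_one_eq_reverse]
    norm_num
  rw [hrange, List.filter_reverse]
  -- the ascending filtered index list, shared by both sides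
  set P : Int → Bool := fun i => PySem.Str.strip (PySem.List.pyGetD lines i "") ≠ "" with hPdef
  set rF : List Int := (PySem.List.pyRange 0 (lines.length : Int) 1).filter P with hrF
  have hidx : ((PySem.List.enumerate lines 0).filter
      (fun p => PySem.Str.strip p.2 ≠ "")).map (·.1) = rF := by
    rw [PySem.List.enumerate_eq_map_pyRange lines ""]
    rw [hrF, hPdef, List.filter_map, List.map_map]
    simp [Function.comp_def, PySem.List.len]
  rw [hidx]
  by_cases hn : n ≤ 0
  · have h1 : ¬ (n ≥ 1 ∧ (rF.length : Int) ≥ n) := by omega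
    simp [hn, h1]
  · by_cases hlen : (rF.length : Int) ≥ n
    · have hg : n ≥ 1 ∧ (rF.length : Int) ≥ n := ⟨by omega, hlen⟩
      have hk : n.toNat - 1 < rF.length := by omega
      have hget : rF.reverse[n.toNat - 1]? = some rF[rF.length - 1 - (n.toNat - 1)] := by
        rw [List.getElem?_reverse (by omega)]
        exact List.getElem?_eq_getElem (by omega)
      have hneg : PySem.List.pyGetD rF (-n) 0 = rF[rF.length - n.toNat] := by
        have := PySem.List.pyGetD_neg_natCast rF n.toNat (0:Int)
          (by omega) (by omega)
        rwa [show ((n.toNat : Int)) = n by omega] at this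
      have hidxeq : rF.length - 1 - (n.toNat - 1) = rF.length - n.toNat := by omega
      simp [hn, hg, hget, hneg, hidxeq]
    · have h1 : ¬ (n ≥ 1 ∧ (rF.length : Int) ≥ n) := by omega
      have h2 : rF.reverse[n.toNat - 1]? = none := by
        apply List.getElem?_eq_none
        simp only [List.length_reverse]
        omega
      simp [hn, h1, h2]
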